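-- pv_equiv track=rewrite | github.com/Lifor7-r/ElectroPlot-python | cv_cycle_choose.py | cycles_with_interval
-- ===== SOURCE A (Python) =====
-- def cycles_with_interval(cycles_in_range, lo, hi, step):
--     """
--     在 cycles_in_range（已排序、且落在 [lo,hi] 内）中按间隔取样：
--       - 必含「第一圈」；再从「首圈 + (step−1)」起每隔 step 取一圈（若存在），直到超过范围内尾圈；
--       - 不要求必含最后一圈（例：1～11、间隔 5 → 1,5,10）。
--     例：1～10、step=5 → 1,5,10；step=2 → 1,2,4,6,8,10。
--     """
--     if step is None or int(step) < 1:
--         step = 1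
--     step = int(step)
--     if not cycles_in_range:
--         return []
--     if step == 1:
--         return list(cycles_in_range)
--
--     exist = set(cycles_in_range)
--     first = cycles_in_range[0]
--     last = cycles_in_range[-1]
--
--     out_set = {first}
--     s = first + step - 1
--     while s <= last:
--         if s in exist:
--             out_set.add(s)
--         s += step
--
--     return [c for c in cycles_in_range if c in out_set]
-- ===== SOURCE B (Python) =====
-- def cycles_with_interval(cycles_in_range, lo, hi, step):
--     if step is None or int(step) < 1:
--         step = 1
--     step = int(step)
--     if not cycles_in_range:
--         return []
--     if step == 1:
--         return list(cycles_in_range)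
--     first = cycles_in_range[0]
--     last = cycles_in_range[-1]
--     base = first + step - 1
--     return [c for c in cycles_in_range
--             if c == first or (base <= c <= last and (c - base) % step == 0)]
-- ===== Notes on version B (the rewrite author's own statement) =====
-- stated objective: simpler
-- what changed: Replaces the existence-set plus range-stepping while-loop with a single arithmetic filter over the list (c == first, or base <= c <= last and (c - base) % step == 0), dropping both auxiliary structures.
import Mathlib
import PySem

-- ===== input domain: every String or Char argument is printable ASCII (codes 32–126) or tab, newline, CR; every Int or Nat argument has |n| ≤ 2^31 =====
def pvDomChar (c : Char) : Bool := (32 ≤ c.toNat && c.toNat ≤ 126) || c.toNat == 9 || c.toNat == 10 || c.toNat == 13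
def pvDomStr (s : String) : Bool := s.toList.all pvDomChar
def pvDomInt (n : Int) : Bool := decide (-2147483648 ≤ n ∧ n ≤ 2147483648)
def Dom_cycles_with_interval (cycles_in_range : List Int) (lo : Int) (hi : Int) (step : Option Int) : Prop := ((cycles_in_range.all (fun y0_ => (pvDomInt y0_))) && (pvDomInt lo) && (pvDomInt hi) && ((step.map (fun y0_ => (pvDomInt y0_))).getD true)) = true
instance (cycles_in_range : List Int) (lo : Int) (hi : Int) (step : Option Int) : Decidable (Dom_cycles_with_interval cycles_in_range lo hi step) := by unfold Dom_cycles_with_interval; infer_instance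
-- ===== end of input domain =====

-- B replaces A's existence-set + range-stepping while-loop by a single arithmetic
-- filter over the list (objective: simpler; return values proved equal everywhere).

-- ===== PORT A =====
-- the 'while s <= last: ... s += step' loop; the '1 ≤ step' conjunct in the guard is
-- only a totality guard (at every call site step ≥ 2, so the guard is just 's ≤ last')
def cwiLoop (exist : PySem.Set Int) (last step : Int) (s : Int) (acc : PySem.Set Int) : PySem.Set Int :=
  if _h : s ≤ last ∧ 1 ≤ step then
    cwiLoop exist last step (s + step) (if exist.contains s then PySem.Set.add acc s else acc)
  else acc
termination_by (last + 1 - s).toNat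
decreasing_by omega

def cycles_with_interval (cycles_in_range : List Int) (lo : Int) (hi : Int) (step : Option Int) : List Int :=
  -- 'if step is None or int(step) < 1: step = 1; step = int(step)'
  let step : Int := match step with
    | none => 1
    | some s => if s < 1 then 1 else s
  if cycles_in_range = [] then []
  else if step = 1 then cycles_in_range
  else
    let exist : PySem.Set Int := PySem.Set.ofList cycles_in_range
    let first : Int := cycles_in_range.headD 0            -- cycles_in_range[0], list nonempty
    let last : Int := cycles_in_range.getLastD 0          -- cycles_in_range[-1], list nonempty
    let out_set : PySem.Set Int := cwiLoop exist last step (first + step - 1) (PySem.Set.add PySem.Set.empty first)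
    cycles_in_range.filter (fun c => out_set.contains c)

-- ===== PORT B =====
def cycles_with_interval_alt (cycles_in_range : List Int) (lo : Int) (hi : Int) (step : Option Int) : List Int :=
  let step : Int := match step with
    | none => 1
    | some s => if s < 1 then 1 else s
  if cycles_in_range = [] then []
  else if step = 1 then cycles_in_range
  else
    let first : Int := cycles_in_range.headD 0
    let last : Int := cycles_in_range.getLastD 0
    let base : Int := first + step - 1
    cycles_in_range.filter (fun c =>
      c == first || (decide (base ≤ c) && decide (c ≤ last) && (PySem.Int.mod (c - base) step == 0)))

-- ===== PRECONDITION & SPEC =====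
def Spec_cycles_with_interval (cycles_in_range : List Int) (lo : Int) (hi : Int) (step : Option Int) (out : List Int) : Prop := out = cycles_with_interval_alt cycles_in_range lo hi step
instance (cycles_in_range : List Int) (lo : Int) (hi : Int) (step : Option Int) (out : List Int) : Decidable (Spec_cycles_with_interval cycles_in_range lo hi step out) := by unfold Spec_cycles_with_interval; infer_instance

-- ===== CLAIM (what is proved, stated in full; the proofs are below) =====
def Claim_equal_cycles_with_interval : Prop := ∀ (cycles_in_range : List Int) (lo : Int) (hi : Int) (step : Option Int), Dom_cycles_with_interval cycles_in_range lo hi step → Spec_cycles_with_interval cycles_in_range lo hi step (cycles_with_interval cycles_in_range lo hi step)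

-- ===== LEMMAS AND PROOFS =====

-- membership in the set built by A's while-loop
lemma cwiLoop_contains (exist : PySem.Set Int) (last step : Int) (hstep : 1 ≤ step)
    (s : Int) (acc : PySem.Set Int) (x : Int) :
    (cwiLoop exist last step s acc).contains x = true ↔
      acc.contains x = true ∨
        (exist.contains x = true ∧ s ≤ x ∧ x ≤ last ∧ step ∣ x - s) := by
  fun_induction cwiLoop exist last step s acc with
  | case1 s acc h ih =>
    simp only [dite_eq_ite] at ih
    rw [ih]
    constructor
    · rintro (hacc | ⟨hx, hle, hle', k, hk⟩)
      · split at hacc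
        · rw [PySem.Set.contains_iff, PySem.Set.mem_add] at hacc
          rcases hacc with hmem | rfl
          · exact Or.inl (by rw [PySem.Set.contains_iff]; exact hmem)
          · exact Or.inr ⟨by assumption, le_refl _, h.1, ⟨0, by ring⟩⟩
        · exact Or.inl hacc
      · refine Or.inr ⟨hx, by omega, hle', ⟨k + 1, by linarith [hk]⟩⟩
    · rintro (hacc | ⟨hx, hle, hle', k, hk⟩)
      · left
        split
        · rw [PySem.Set.contains_iff, PySem.Set.mem_add]
          rw [PySem.Set.contains_iff] at hacc
          exact Or.inl hacc
        · exact hacc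
      · by_cases hxs : x = s
        · subst hxs
          left
          rw [PySem.Set.contains_iff, if_pos hx]
          exact (PySem.Set.mem_add _ _ _).mpr (Or.inr rfl)
        · -- x > s and step ∣ x - s with x - s = step * k, k ≥ 1 ⇒ x ≥ s + step
          have hk1 : 1 ≤ k := by
            rcases lt_or_ge k 1 with hlt | hge
            · exfalso
              have : k ≤ 0 := by omega
              have : step * k ≤ 0 := mul_nonpos_of_nonneg_of_nonpos (by omega) this
              omega
            · exact hge
          have : step ≤ step * k := le_mul_of_one_le_right (by omega) hk1
          exact Or.inr ⟨hx, by omega, hle', ⟨k - 1, by ring_nf; omega⟩⟩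
  | case2 s acc h =>
    constructor
    · exact Or.inl
    · rintro (hacc | ⟨_, hle, hle', _⟩)
      · exact hacc
      · exact absurd ⟨by omega, hstep⟩ h

theorem cycles_with_interval_spec_aux (cycles_in_range : List Int) (lo hi : Int) (step : Option Int) :
    cycles_with_interval cycles_in_range lo hi step = cycles_with_interval_alt cycles_in_range lo hi step := by
  unfold cycles_with_interval cycles_with_interval_alt
  set st : Int := (match step with
    | none => 1
    | some s => if s < 1 then 1 else s) with hst
  have hst1 : 1 ≤ st := by
    rw [hst]; cases step with
    | none => norm_num
    | some s => dsimp only; split <;> omega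
  by_cases hnil : cycles_in_range = []
  · simp [hnil]
  · simp only [if_neg hnil]
    by_cases h1 : st = 1
    · simp [h1]
    · have hst2 : 2 ≤ st := by omega
      simp only [if_neg h1]
      apply List.filter_congr
      intro c hc
      have hmem : (PySem.Set.ofList cycles_in_range).contains c = true := by
        rw [PySem.Set.contains_iff, PySem.Set.mem_ofList]; exact hc
      rw [Bool.eq_iff_iff]
      rw [cwiLoop_contains _ _ _ (by omega)]
      have hinit : (PySem.Set.add PySem.Set.empty (cycles_in_range.headD 0)).contains c = true ↔
          c = cycles_in_range.headD 0 := by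
        rw [PySem.Set.contains_iff, PySem.Set.mem_add]
        simp [PySem.Set.empty]
      rw [hinit]
      simp only [Bool.or_eq_true, Bool.and_eq_true, beq_iff_eq, decide_eq_true_eq,
        PySem.Int.mod_eq_zero_iff_dvd]
      tauto

-- ===== VERDICT (by name: the statement is the Claim_ definition above) =====
theorem cycles_with_interval_spec : Claim_equal_cycles_with_interval := by
  intro xs lo hi step _
  exact cycles_with_interval_spec_aux xs lo hi step
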